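-- pv_equiv track=rewrite | github.com/chenni666/v5_ini | main.py | _strip_anti_aliasing_setting
-- ===== SOURCE A (Python) =====
-- from typing import Dict, List, Optional, Set, Tuple
--
-- def _strip_anti_aliasing_setting(content: str) -> Tuple[str, bool]:
--     lines = content.splitlines()
--     target = "sg.AntiAliasingQuality=0"
--     header_token = "[scalabilitygroups]"
--
--     start_idx: Optional[int] = None
--     for idx, line in enumerate(lines):
--         if line.strip().lower() == header_token:
--             start_idx = idx
--             break
--
--     if start_idx is not None:
--         end_idx = len(lines)
--         for idx in range(start_idx + 1, len(lines)):
--             stripped = lines[idx].strip()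
--             if stripped.startswith("[") and stripped.endswith("]"):
--                 end_idx = idx
--                 break
--
--         section = lines[start_idx + 1 : end_idx]
--         filtered_section = [line for line in section if line.strip() != target]
--         removed_in_section = len(filtered_section) != len(section)
--
--         if removed_in_section:
--             lines[start_idx + 1 : end_idx] = filtered_section
--
--             if not any(line.strip() for line in filtered_section):
--                 del lines[start_idx:end_idx]
--
--                 while start_idx < len(lines) and not lines[start_idx].strip():
--                     del lines[start_idx]
--
--                 prev_idx = start_idx - 1
--                 while prev_idx >= 0 and not lines[prev_idx].strip():
--                     del lines[prev_idx]
--                     prev_idx -= 1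
--
--             return "\n".join(lines), True
--
--     trimmed_lines = [line for line in lines if line.strip() != target]
--     removed = len(trimmed_lines) != len(lines)
--     return "\n".join(trimmed_lines), removed
-- ===== SOURCE B (Python) =====
-- def _split_first(lines, pred):
--     """Split into (prefix before first line satisfying pred, rest starting at it)."""
--     for i, l in enumerate(lines):
--         if pred(l):
--             return lines[:i], lines[i:]
--     return lines, []
--
--
-- def _drop_leading_blanks(ls):
--     i = 0
--     while i < len(ls) and not ls[i].strip():
--         i += 1
--     return ls[i:]
--
--
-- def _drop_trailing_blanks(ls):
--     j = len(ls)
--     while j > 0 and not ls[j - 1].strip():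
--         j -= 1
--     return ls[:j]
--
--
-- def _strip_anti_aliasing_setting(content):
--     lines = content.splitlines()
--     target = "sg.AntiAliasingQuality=0"
--
--     def is_sg_header(l):
--         return l.strip().lower() == "[scalabilitygroups]"
--
--     def is_header(l):
--         s = l.strip()
--         return s.startswith("[") and s.endswith("]")
--
--     before, found = _split_first(lines, is_sg_header)
--     if found:
--         header, body_and_rest = found[0], found[1:]
--         body, after = _split_first(body_and_rest, is_header)
--         kept = [l for l in body if l.strip() != target]
--         if len(kept) != len(body):
--             if any(l.strip() for l in kept):
--                 return "\n".join(before + [header] + kept + after), True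
--             return "\n".join(_drop_trailing_blanks(before) + _drop_leading_blanks(after)), True
--     kept_all = [l for l in lines if l.strip() != target]
--     return "\n".join(kept_all), len(kept_all) != len(lines)
-- ===== Notes on version B (the rewrite author's own statement) =====
-- stated objective: simpler
-- what changed: Replaces A's index bookkeeping, slice assignment and three in-place deletion loops over a mutated list by a purely functional decomposition: split the lines at the section header and at the next header into before/body/after, filter the body, and reassemble (or drop the emptied section plus surrounding blank runs).
-- intended difference: When the ScalabilityGroups section body holds only the target line(s) and blanks AND more lines follow the section, A's stale end index additionally deletes as many lines after the section as were removed (e.g. the next section's header): A returns the file with those extra lines gone, B keeps them and removes only the emptied section with its surrounding blank lines, which is the intended cleanup. — e.g. on _strip_anti_aliasing_setting("[scalabilitygroups]\nsg.AntiAliasingQuality=0\n[a]\nx"): A returns ("x", true), B returns ("[a]\nx", true)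
import Mathlib
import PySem

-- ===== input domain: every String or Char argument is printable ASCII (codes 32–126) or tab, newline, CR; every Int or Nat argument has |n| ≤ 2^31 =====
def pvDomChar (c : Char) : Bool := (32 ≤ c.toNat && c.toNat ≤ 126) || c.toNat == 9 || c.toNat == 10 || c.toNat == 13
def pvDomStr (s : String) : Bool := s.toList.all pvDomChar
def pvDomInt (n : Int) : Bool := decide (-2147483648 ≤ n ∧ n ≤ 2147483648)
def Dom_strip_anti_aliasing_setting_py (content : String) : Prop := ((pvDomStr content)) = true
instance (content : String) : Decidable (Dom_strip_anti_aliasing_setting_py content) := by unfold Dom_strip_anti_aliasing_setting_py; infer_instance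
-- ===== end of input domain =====

-- B replaces A's index/slice/in-place-mutation phases by a recursive three-way split of the
-- line list (before / section body / after) assembled functionally; on the corner where A's
-- stale end index deletes lines past the now-empty section, B keeps them (see D_ below).

-- shared line predicates (the literal string tests both Pythons perform)
def pvIsSG (l : String) : Bool := PySem.Str.lower (PySem.Str.strip l) == "[scalabilitygroups]"
def pvIsHdr (l : String) : Bool :=
  PySem.Str.startswith (PySem.Str.strip l) "[" && PySem.Str.endswith (PySem.Str.strip l) "]"
def pvKeep (l : String) : Bool := PySem.Str.strip l != "sg.AntiAliasingQuality=0"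
def pvNonBlank (l : String) : Bool := PySem.Str.strip l != ""

-- ===== PORT A =====
-- `for idx, line in enumerate(lines): if …: start_idx = idx; break`
def pvAFindStart : Nat → List String → Option Nat
  | _, [] => none
  | i, l :: ls => if pvIsSG l then some i else pvAFindStart (i + 1) ls

-- `for idx in range(start_idx+1, len(lines)): …` walking lines[idx:] with idx as counter;
-- falls off the end at idx = len(lines), A's default end_idx
def pvAFindEndAux : List String → Nat → Nat
  | [], idx => idx
  | l :: ls, idx => if pvIsHdr l then idx else pvAFindEndAux ls (idx + 1)
def pvAFindEnd (lines : List String) (idx : Nat) : Nat := pvAFindEndAux (lines.drop idx) idx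

-- `while start_idx < len(lines) and not lines[start_idx].strip(): del lines[start_idx]`
-- (each pass shortens the list by one, so the initial length is enough fuel)
def pvADelFwdAux : Nat → Nat → List String → List String
  | 0, _, L => L
  | fuel + 1, s, L =>
    if h : s < L.length then
      if pvNonBlank L[s] then L else pvADelFwdAux fuel s (L.take s ++ L.drop (s + 1))
    else L
def pvADelFwd (s : Nat) (L : List String) : List String := pvADelFwdAux L.length s L

-- `while prev_idx >= 0 and not lines[prev_idx].strip(): del lines[prev_idx]; prev_idx -= 1`
-- (p decreases by one per pass, so (p+1).toNat is enough fuel; the index is in range whenever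
-- the loop body runs in A, so pyGetD with a default is exact here)
def pvADelBwdAux : Nat → Int → List String → List String
  | 0, _, L => L
  | fuel + 1, p, L =>
    if 0 ≤ p ∧ ¬ pvNonBlank (PySem.List.pyGetD L p "") then
      pvADelBwdAux fuel (p - 1) (L.take p.toNat ++ L.drop (p.toNat + 1))
    else L
def pvADelBwd (p : Int) (L : List String) : List String := pvADelBwdAux (p + 1).toNat p L

def strip_anti_aliasing_setting_py (content : String) : String × Bool :=
  let lines := PySem.Str.splitlines content
  match pvAFindStart 0 lines with
  | some s =>
    let e := pvAFindEnd lines (s + 1)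
    let sec := PySem.List.slice lines (some ((s : Int) + 1)) (some (e : Int))
    let filtered := sec.filter pvKeep
    if filtered.length != sec.length then
      -- `lines[start_idx+1:end_idx] = filtered_section` (0 ≤ s+1 ≤ e, so exact)
      let lines1 := PySem.List.slice lines none (some ((s : Int) + 1)) ++ filtered
                      ++ PySem.List.slice lines (some (e : Int)) none
      if filtered.any pvNonBlank then
        (PySem.Str.join "\n" lines1, true)
      else
        -- `del lines[start_idx:end_idx]` (s ≤ e, so exact)
        let lines2 := PySem.List.slice lines1 none (some (s : Int))
                        ++ PySem.List.slice lines1 (some (e : Int)) none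
        let lines3 := pvADelFwd s lines2
        let lines4 := pvADelBwd ((s : Int) - 1) lines3
        (PySem.Str.join "\n" lines4, true)
    else
      let trimmed := lines.filter pvKeep
      (PySem.Str.join "\n" trimmed, trimmed.length != lines.length)
  | none =>
    let trimmed := lines.filter pvKeep
    (PySem.Str.join "\n" trimmed, trimmed.length != lines.length)

-- ===== PORT B =====
def pvSplitFirst (p : String → Bool) : List String → List String × List String
  | [] => ([], [])
  | l :: ls =>
    if p l then ([], l :: ls)
    else
      let r := pvSplitFirst p ls
      (l :: r.1, r.2)

def pvDropLeadingBlanks : List String → List String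
  | [] => []
  | l :: ls => if pvNonBlank l then l :: ls else pvDropLeadingBlanks ls

def pvDropTrailingBlanks : List String → List String
  | [] => []
  | l :: ls =>
    let rest := pvDropTrailingBlanks ls
    if !rest.isEmpty || pvNonBlank l then l :: rest else []

def strip_anti_aliasing_setting_py_alt (content : String) : String × Bool :=
  let lines := PySem.Str.splitlines content
  let bf := pvSplitFirst pvIsSG lines
  match bf.2 with
  | header :: bodyAndRest =>
    let ba := pvSplitFirst pvIsHdr bodyAndRest
    let kept := ba.1.filter pvKeep
    if kept.length != ba.1.length then
      if kept.any pvNonBlank then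
        (PySem.Str.join "\n" (bf.1 ++ [header] ++ kept ++ ba.2), true)
      else
        (PySem.Str.join "\n" (pvDropTrailingBlanks bf.1 ++ pvDropLeadingBlanks ba.2), true)
    else
      let keptAll := lines.filter pvKeep
      (PySem.Str.join "\n" keptAll, keptAll.length != lines.length)
  | [] =>
    let keptAll := lines.filter pvKeep
    (PySem.Str.join "\n" keptAll, keptAll.length != lines.length)

-- ===== PRECONDITION & SPEC =====
-- On inputs whose ScalabilityGroups section body consists of the target line(s) and blanks
-- only and is followed by a further line, A's stale end index makes it delete the removed-line
-- count of lines AFTER the section (typically the next section's header); B deletes only the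
-- emptied section and the surrounding blank lines, which is the intended behaviour.
def D_strip_anti_aliasing_setting_py (content : String) : Prop :=
  let lines := PySem.Str.splitlines content
  let rest := lines.dropWhile (fun l => !pvIsSG l)
  rest ≠ [] ∧
    (∃ l ∈ rest.tail.takeWhile (fun l => !pvIsHdr l), pvKeep l = false) ∧
    (∀ l ∈ rest.tail.takeWhile (fun l => !pvIsHdr l), pvKeep l = false ∨ pvNonBlank l = false) ∧
    rest.tail.dropWhile (fun l => !pvIsHdr l) ≠ []
instance (content : String) : Decidable (D_strip_anti_aliasing_setting_py content) := by
  unfold D_strip_anti_aliasing_setting_py; infer_instance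

def Spec_strip_anti_aliasing_setting_py (content : String) (out : String × Bool) : Prop :=
  ¬ D_strip_anti_aliasing_setting_py content → out = strip_anti_aliasing_setting_py_alt content
instance (content : String) (out : String × Bool) : Decidable (Spec_strip_anti_aliasing_setting_py content out) := by
  unfold Spec_strip_anti_aliasing_setting_py; infer_instance

def pvDiffWitness_strip_anti_aliasing_setting_py : String :=
  "[scalabilitygroups]\nsg.AntiAliasingQuality=0\n[a]\nx"
def pvDiffWitnessOut_strip_anti_aliasing_setting_py : (String × Bool) × (String × Bool) :=
  (("x", true), ("[a]\nx", true))

-- ===== CLAIM (what is proved, stated in full; the proofs are below) =====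
def Claim_unchanged_strip_anti_aliasing_setting_py : Prop := ∀ (content : String), Dom_strip_anti_aliasing_setting_py content → Spec_strip_anti_aliasing_setting_py content (strip_anti_aliasing_setting_py content)
def Claim_changed_strip_anti_aliasing_setting_py : Prop := Dom_strip_anti_aliasing_setting_py (pvDiffWitness_strip_anti_aliasing_setting_py) ∧ D_strip_anti_aliasing_setting_py (pvDiffWitness_strip_anti_aliasing_setting_py) ∧ strip_anti_aliasing_setting_py (pvDiffWitness_strip_anti_aliasing_setting_py) = pvDiffWitnessOut_strip_anti_aliasing_setting_py.1 ∧ strip_anti_aliasing_setting_py_alt (pvDiffWitness_strip_anti_aliasing_setting_py) = pvDiffWitnessOut_strip_anti_aliasing_setting_py.2 ∧ pvDiffWitnessOut_strip_anti_aliasing_setting_py.1 ≠ pvDiffWitnessOut_strip_anti_aliasing_setting_py.2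
def Claim_exact_strip_anti_aliasing_setting_py : Prop := ∀ (content : String), Dom_strip_anti_aliasing_setting_py content → D_strip_anti_aliasing_setting_py content → strip_anti_aliasing_setting_py content ≠ strip_anti_aliasing_setting_py_alt content

-- ===== LEMMAS AND PROOFS =====

theorem pvSplitFirst_eq (p : String → Bool) (ls : List String) :
    pvSplitFirst p ls = (ls.takeWhile (fun l => !p l), ls.dropWhile (fun l => !p l)) := by
  induction ls with
  | nil => rfl
  | cons l ls ih =>
    simp only [pvSplitFirst, List.takeWhile, List.dropWhile]
    cases hp : p l
    · simp [ih]
    · simp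

theorem pvAFindStart_eq (ls : List String) (i : Nat) :
    pvAFindStart i ls =
      match ls.dropWhile (fun l => !pvIsSG l) with
      | [] => none
      | _ :: _ => some (i + (ls.takeWhile (fun l => !pvIsSG l)).length) := by
  induction ls generalizing i with
  | nil => rfl
  | cons l ls ih =>
    simp only [pvAFindStart, List.takeWhile, List.dropWhile]
    cases hp : pvIsSG l with
    | true => simp
    | false =>
      simp only [Bool.not_false, ih (i + 1)]
      cases ls.dropWhile (fun l => !pvIsSG l)
      · simp
      · simp; omega

theorem pvAFindEndAux_eq (post : List String) (i : Nat) :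
    pvAFindEndAux post i = i + (post.takeWhile (fun l => !pvIsHdr l)).length := by
  induction post generalizing i with
  | nil => simp [pvAFindEndAux]
  | cons x xs ih =>
    simp only [pvAFindEndAux, List.takeWhile]
    cases hh : pvIsHdr x with
    | true => simp
    | false => simp only [Bool.false_eq_true, if_false, Bool.not_false, ih (i + 1), List.length_cons]; omega

theorem pvADelFwdAux_eq (rest : List String) (fuel : Nat) (pre : List String)
    (hf : rest.length ≤ fuel) :
    pvADelFwdAux fuel pre.length (pre ++ rest)
      = pre ++ rest.dropWhile (fun l => !pvNonBlank l) := by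
  induction rest generalizing fuel with
  | nil =>
    cases fuel with
    | zero => simp [pvADelFwdAux]
    | succ f => rw [pvADelFwdAux]; simp
  | cons r rs ih =>
    cases fuel with
    | zero => simp at hf
    | succ f =>
      rw [pvADelFwdAux]
      have hlt : pre.length < (pre ++ r :: rs).length := by simp
      rw [dif_pos hlt]
      have hr : (pre ++ r :: rs)[pre.length] = r := by
        simp [List.getElem_append_right (Nat.le_refl pre.length)]
      rw [hr, List.dropWhile]
      cases hb : pvNonBlank r with
      | true => simp
      | false =>
        have ht : (pre ++ r :: rs).take pre.length = pre := List.take_left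
        have hd : (pre ++ r :: rs).drop (pre.length + 1) = rs := by
          rw [show pre.length + 1 = (pre ++ [r]).length by simp,
            show pre ++ r :: rs = (pre ++ [r]) ++ rs by simp]
          exact List.drop_left
        simp only [Bool.false_eq_true, if_false, ht, hd, Bool.not_false]
        exact ih f (by simpa using Nat.le_of_succ_le_succ hf)

theorem pvADelFwd_eq (pre rest : List String) :
    pvADelFwd pre.length (pre ++ rest) = pre ++ rest.dropWhile (fun l => !pvNonBlank l) := by
  unfold pvADelFwd
  exact pvADelFwdAux_eq rest _ pre (by simp)

theorem pvDropTrailingBlanks_append_singleton (pre : List String) (x : String) :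
    pvDropTrailingBlanks (pre ++ [x])
      = if pvNonBlank x then pre ++ [x] else pvDropTrailingBlanks pre := by
  induction pre with
  | nil => cases hb : pvNonBlank x <;> simp [pvDropTrailingBlanks, hb]
  | cons l ls ih =>
    simp only [List.cons_append, pvDropTrailingBlanks, ih]
    cases hb : pvNonBlank x with
    | true => simp
    | false => simp

theorem pvADelBwdAux_eq (pre tl : List String) (fuel : Nat) (hf : pre.length ≤ fuel) :
    pvADelBwdAux fuel ((pre.length : Int) - 1) (pre ++ tl) = pvDropTrailingBlanks pre ++ tl := by
  induction pre using List.reverseRecOn generalizing fuel with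
  | nil =>
    cases fuel with
    | zero => simp [pvADelBwdAux, pvDropTrailingBlanks]
    | succ f =>
      rw [pvADelBwdAux]
      simp [pvDropTrailingBlanks]
  | append_singleton pre x ih =>
    cases fuel with
    | zero => simp at hf
    | succ f =>
      rw [pvADelBwdAux]
      have hget : PySem.List.pyGetD ((pre ++ [x]) ++ tl) (((pre ++ [x]).length : Int) - 1) ""
          = x := by
        have h1 : ((pre ++ [x]).length : Int) - 1 = ((pre.length : Nat) : Int) := by simp
        rw [h1, PySem.List.pyGetD_natCast]
        simp [List.getD]
      rw [hget, pvDropTrailingBlanks_append_singleton]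
      cases hb : pvNonBlank x with
      | true => simp
      | false =>
        have hc : (0 : Int) ≤ ((pre ++ [x]).length : Int) - 1 := by simp
        rw [if_pos ⟨hc, by simp⟩]
        have htn : (((pre ++ [x]).length : Int) - 1).toNat = pre.length := by simp
        have ht : ((pre ++ [x]) ++ tl).take pre.length = pre := by
          rw [List.append_assoc]; exact List.take_left
        have hd : ((pre ++ [x]) ++ tl).drop (pre.length + 1) = tl := by
          rw [show pre.length + 1 = (pre ++ [x]).length by simp]
          exact List.drop_left
        have hp : ((pre ++ [x]).length : Int) - 1 - 1 = (pre.length : Int) - 1 := by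
          simp
        rw [htn, ht, hd, hp]
        simp only [Bool.false_eq_true, if_false]
        exact ih f (by simp at hf; omega)

theorem pvADelBwd_eq (pre tl : List String) :
    pvADelBwd ((pre.length : Int) - 1) (pre ++ tl) = pvDropTrailingBlanks pre ++ tl := by
  unfold pvADelBwd
  exact pvADelBwdAux_eq pre tl _ (by omega)

theorem pvJoinLen (parts : List (List Char)) (hne : parts ≠ []) :
    (PySem.Chars.join ['\n'] parts).length + 1 = (parts.map List.length).sum + parts.length := by
  induction parts with
  | nil => simp at hne
  | cons p ps ih =>
    cases ps with
    | nil => simp [PySem.Chars.join_singleton]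
    | cons q rest =>
      rw [PySem.Chars.join_cons_cons]
      have h1 := ih (by simp)
      simp only [List.length_append, List.map_cons, List.sum_cons, List.length_cons, List.length_nil] at h1 ⊢
      omega

theorem pvStrJoinLen (ls : List String) (hne : ls ≠ []) :
    (PySem.Str.join "\n" ls).toList.length + 1
      = (ls.map (fun s => s.toList.length)).sum + ls.length := by
  rw [PySem.Str.toList_join, show ("\n" : String).toList = ['\n'] from rfl,
    pvJoinLen _ (by simpa using hne)]
  simp [List.map_map, Function.comp_def]

theorem pvHdr_nonblank (l : String) (h : pvIsHdr l = true) : pvNonBlank l = true := by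
  unfold pvIsHdr at h
  unfold pvNonBlank
  rw [Bool.and_eq_true] at h
  obtain ⟨hsw, -⟩ := h
  by_contra hc
  simp only [bne_iff_ne, ne_eq, not_not] at hc
  rw [hc] at hsw
  exact absurd hsw (by decide)

theorem pvHdr_ne_empty (l : String) (h : pvIsHdr l = true) : l ≠ "" := by
  intro hc; rw [hc] at h; exact absurd h (by decide)

-- ===== VERDICT (by name: the statement is the Claim_ definition above) =====
theorem strip_anti_aliasing_setting_py_spec : Claim_unchanged_strip_anti_aliasing_setting_py := by
  intro content _
  unfold Spec_strip_anti_aliasing_setting_py D_strip_anti_aliasing_setting_py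
  intro hnd
  unfold strip_anti_aliasing_setting_py strip_anti_aliasing_setting_py_alt
  simp only [pvAFindStart_eq, pvSplitFirst_eq] at hnd ⊢
  generalize PySem.Str.splitlines content = L at hnd ⊢
  rcases hdrop : L.dropWhile (fun l => !pvIsSG l) with _ | ⟨h, R2⟩
  · simp only []
  · simp only [hdrop, Nat.zero_add, List.tail_cons] at hnd ⊢
    set T := List.takeWhile (fun l => !pvIsSG l) L with hT
    set T2 := List.takeWhile (fun l => !pvIsHdr l) R2 with hT2
    set D2 := List.dropWhile (fun l => !pvIsHdr l) R2 with hD2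
    set F := List.filter pvKeep T2 with hF
    have hLsplit : T ++ h :: R2 = L := by
      rw [hT, ← hdrop]; exact List.takeWhile_append_dropWhile
    have hR2 : T2 ++ D2 = R2 := List.takeWhile_append_dropWhile
    have hdropL : L.drop (T.length + 1) = R2 := by
      rw [← hLsplit, show T.length + 1 = (T ++ [h]).length by simp,
        show T ++ h :: R2 = (T ++ [h]) ++ R2 by simp]
      exact List.drop_left
    have he : pvAFindEnd L (T.length + 1) = T.length + 1 + T2.length := by
      rw [pvAFindEnd, hdropL, pvAFindEndAux_eq, hT2]
    rw [he]
    have hc1 : ((T.length : Int) + 1) = ((T.length + 1 : Nat) : Int) := by push_cast; ring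
    have hsec : PySem.List.slice L (some ((T.length : Int) + 1))
        (some ((T.length + 1 + T2.length : Nat) : Int)) = T2 := by
      rw [hc1, PySem.List.slice_natCast, hdropL,
        show T.length + 1 + T2.length - (T.length + 1) = T2.length by omega, ← hR2]
      exact List.take_left
    have htake : PySem.List.slice L none (some ((T.length : Int) + 1)) = T ++ [h] := by
      rw [hc1, PySem.List.slice_to_natCast, ← hLsplit,
        show T ++ h :: R2 = (T ++ [h]) ++ R2 by simp,
        show T.length + 1 = (T ++ [h]).length by simp]
      exact List.take_left
    have hdropE : PySem.List.slice L (some ((T.length + 1 + T2.length : Nat) : Int)) none = D2 := by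
      rw [PySem.List.slice_from_natCast, ← hLsplit, ← hR2,
        show T ++ h :: (T2 ++ D2) = (T ++ h :: T2) ++ D2 by simp,
        show T.length + 1 + T2.length = (T ++ h :: T2).length by simp; omega]
      exact List.drop_left
    rw [hsec, htake, hdropE]
    by_cases hrm : F.length = T2.length
    · rw [if_neg (by rw [hrm]; simp), if_neg (by rw [hrm]; simp)]
    · have hcond : (F.length != T2.length) = true := by simpa [bne_iff_ne] using hrm
      rw [hcond, if_pos rfl, if_pos rfl]
      cases hany : F.any pvNonBlank with
      | true => simp [← hF, List.append_assoc]
      | false =>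
        rw [if_neg (by simp), if_neg (by simp)]
        -- ¬D_ forces the part after the section to be empty
        have hex : ∃ l ∈ T2, pvKeep l = false := by
          by_contra hc
          rw [not_exists] at hc
          exact hrm (List.length_filter_eq_length_iff.2 (by simpa using hc))
        have hallb : ∀ l ∈ F, pvNonBlank l = false := by simpa using hany
        have hall : ∀ l ∈ T2, pvKeep l = false ∨ pvNonBlank l = false := by
          intro l hl
          cases hk : pvKeep l with
          | false => exact Or.inl rfl
          | true => exact Or.inr (hallb l (List.mem_filter.2 ⟨hl, hk⟩))
        have hD2nil : D2 = [] := by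
          by_contra hne
          exact hnd ⟨by simp, hex, hall, hne⟩
        rw [hD2nil]
        have hl1 : (T ++ [h]) ++ F ++ [] = T ++ ([h] ++ F) := by simp
    -- `del lines[s:e]` pieces on the mutated list
        have hc2 : PySem.List.slice (T ++ ([h] ++ F)) none (some ((T.length : Nat) : Int))
            = T := by
          rw [PySem.List.slice_to_natCast]
          exact List.take_left
        have hc3 : PySem.List.slice (T ++ ([h] ++ F)) (some ((T.length + 1 + T2.length : Nat) : Int)) none
            = [] := by
          rw [PySem.List.slice_from_natCast]
          refine List.drop_eq_nil_of_le ?_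
          have := List.length_filter_le pvKeep T2
          simp [hF] at this ⊢
          omega
        rw [hl1, hc2, hc3]
        have hfwd := pvADelFwd_eq T []
        have hbwd := pvADelBwd_eq T []
        simp only [List.dropWhile_nil] at hfwd
        rw [hfwd, hbwd]
        simp [pvDropLeadingBlanks]

theorem strip_anti_aliasing_setting_py_changed : Claim_changed_strip_anti_aliasing_setting_py := by
  unfold Claim_changed_strip_anti_aliasing_setting_py; decide

theorem strip_anti_aliasing_setting_py_tight : Claim_exact_strip_anti_aliasing_setting_py := by
  intro content _ hd
  unfold D_strip_anti_aliasing_setting_py at hd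
  unfold strip_anti_aliasing_setting_py strip_anti_aliasing_setting_py_alt
  simp only [pvAFindStart_eq, pvSplitFirst_eq] at hd ⊢
  generalize PySem.Str.splitlines content = L at hd ⊢
  rcases hdrop : L.dropWhile (fun l => !pvIsSG l) with _ | ⟨h, R2⟩
  · rw [hdrop] at hd; simp at hd
  · rw [hdrop] at hd
    simp only [List.tail_cons, ne_eq] at hd ⊢
    obtain ⟨-, hex, hall, hD2ne⟩ := hd
    simp only [hdrop, Nat.zero_add]
    set T := List.takeWhile (fun l => !pvIsSG l) L with hT
    set T2 := List.takeWhile (fun l => !pvIsHdr l) R2 with hT2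
    set D2 := List.dropWhile (fun l => !pvIsHdr l) R2 with hD2
    set F := List.filter pvKeep T2 with hF
    have hLsplit : T ++ h :: R2 = L := by
      rw [hT, ← hdrop]; exact List.takeWhile_append_dropWhile
    have hR2 : T2 ++ D2 = R2 := List.takeWhile_append_dropWhile
    have hdropL : L.drop (T.length + 1) = R2 := by
      rw [← hLsplit, show T.length + 1 = (T ++ [h]).length by simp,
        show T ++ h :: R2 = (T ++ [h]) ++ R2 by simp]
      exact List.drop_left
    have he : pvAFindEnd L (T.length + 1) = T.length + 1 + T2.length := by
      rw [pvAFindEnd, hdropL, pvAFindEndAux_eq, hT2]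
    rw [he]
    have hc1 : ((T.length : Int) + 1) = ((T.length + 1 : Nat) : Int) := by push_cast; ring
    have hsec : PySem.List.slice L (some ((T.length : Int) + 1))
        (some ((T.length + 1 + T2.length : Nat) : Int)) = T2 := by
      rw [hc1, PySem.List.slice_natCast, hdropL,
        show T.length + 1 + T2.length - (T.length + 1) = T2.length by omega, ← hR2]
      exact List.take_left
    have htake : PySem.List.slice L none (some ((T.length : Int) + 1)) = T ++ [h] := by
      rw [hc1, PySem.List.slice_to_natCast, ← hLsplit,
        show T ++ h :: R2 = (T ++ [h]) ++ R2 by simp,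
        show T.length + 1 = (T ++ [h]).length by simp]
      exact List.take_left
    have hdropE : PySem.List.slice L (some ((T.length + 1 + T2.length : Nat) : Int)) none = D2 := by
      rw [PySem.List.slice_from_natCast, ← hLsplit, ← hR2,
        show T ++ h :: (T2 ++ D2) = (T ++ h :: T2) ++ D2 by simp,
        show T.length + 1 + T2.length = (T ++ h :: T2).length by simp; omega]
      exact List.drop_left
    rw [hsec, htake, hdropE]
    have hFle : F.length ≤ T2.length := List.length_filter_le _ _
    have hrm : F.length ≠ T2.length := by
      have hlt : F.length < T2.length := by
        rw [hF]
        exact List.length_filter_lt_length_iff_exists.mpr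
          (by obtain ⟨l, hl, hkl⟩ := hex; exact ⟨l, hl, by simp [hkl]⟩)
      omega
    have hany : F.any pvNonBlank = false := by
      rw [List.any_eq_false]
      intro x hx
      obtain ⟨hxT2, hxk⟩ := List.mem_filter.mp (hF ▸ hx)
      rcases hall x hxT2 with hk | hb
      · rw [hk] at hxk; cases hxk
      · simp [hb]
    have hcond : (F.length != T2.length) = true := by rw [bne_iff_ne]; exact hrm
    rw [hcond, if_pos rfl, if_pos rfl, hany, if_neg (by simp), if_neg (by simp)]
    -- both are (string, true); show the strings differ via their lengths
    set k := T2.length - F.length with hk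
    have hkpos : 1 ≤ k := by omega
    simp only [List.append_assoc]
    have hdropE2 : PySem.List.slice (T ++ ([h] ++ (F ++ D2)))
        (some ((T.length + 1 + T2.length : Nat) : Int)) none = D2.drop k := by
      rw [PySem.List.slice_from_natCast,
        show T ++ ([h] ++ (F ++ D2)) = ((T ++ [h]) ++ F) ++ D2 by simp,
        List.drop_append, List.drop_eq_nil_of_le (by simp; omega), List.nil_append]
      congr 1
      simp
      omega
    have htake2 : PySem.List.slice (T ++ ([h] ++ (F ++ D2))) none (some ((T.length : Nat) : Int))
        = T := by
      rw [PySem.List.slice_to_natCast]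
      exact List.take_left
    rw [hdropE2, htake2, pvADelFwd_eq, pvADelBwd_eq]
    -- the part after the section starts with a (non-blank) header line
    obtain ⟨d0, D2', hD2cons⟩ := List.exists_cons_of_ne_nil hD2ne
    have hd0hdr : pvIsHdr d0 = true := by
      have hh := List.head?_dropWhile_not (fun l => !pvIsHdr l) R2
      rw [← hD2, hD2cons] at hh
      simpa using hh
    have hdlb : pvDropLeadingBlanks D2 = D2 := by
      rw [hD2cons, pvDropLeadingBlanks, pvHdr_nonblank d0 hd0hdr, if_pos rfl]
    rw [hdlb]
    intro hEq
    have hstr := congrArg Prod.fst hEq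
    simp only [] at hstr
    have hlenEq := congrArg (fun s => s.toList.length) hstr
    simp only [] at hlenEq
    set C := pvDropTrailingBlanks T with hC
    set tA := List.dropWhile (fun l => !pvNonBlank l) (D2.drop k) with htA
    have f := fun s : String => s.toList.length
    -- size bookkeeping
    have hsub1 : ((D2.drop k).map (fun s : String => s.toList.length)).sum
        ≤ (D2.map (fun s : String => s.toList.length)).sum :=
      ((List.drop_sublist k D2).map _).sum_le_sum (by simp)
    have hsub2 : (tA.map (fun s : String => s.toList.length)).sum
        ≤ ((D2.drop k).map (fun s : String => s.toList.length)).sum :=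
      ((List.dropWhile_sublist _).map _).sum_le_sum (by simp)
    have hlen1 : tA.length ≤ D2.length - k := by
      have h1 := (List.dropWhile_sublist (fun l => !pvNonBlank l) (l := D2.drop k)).length_le
      simpa using h1
    have hD2len : 1 ≤ D2.length := by rw [hD2cons]; simp
    have hd0len : 1 ≤ d0.toList.length := by
      have hne := pvHdr_ne_empty d0 hd0hdr
      have : d0.toList ≠ [] := fun hc => hne (String.toList_inj.mp (by simpa using hc))
      cases hl : d0.toList with
      | nil => exact absurd hl this
      | cons _ _ => simp
    have hsum0 : 1 ≤ (D2.map (fun s : String => s.toList.length)).sum := by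
      rw [hD2cons]; simp only [List.map_cons, List.sum_cons]; omega
    by_cases hCA : C ++ tA = []
    · obtain ⟨hCnil, hAnil⟩ := List.append_eq_nil_iff.mp hCA
      rw [hCA, hCnil] at hlenEq
      have hB := pvStrJoinLen D2 (by rw [hD2cons]; simp)
      have hA : (PySem.Str.join "\n" ([] : List String)).toList.length = 0 := by
        rw [PySem.Str.toList_join]; simp [PySem.Chars.join_nil]
      simp only [List.nil_append] at hlenEq
      rw [hA] at hlenEq
      omega
    · have hB := pvStrJoinLen (C ++ D2) (by simp [hD2cons])
      have hA := pvStrJoinLen (C ++ tA) hCA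
      simp only [List.map_append, List.sum_append, List.length_append] at hA hB
      omega
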